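-- pv_equiv track=rewrite | github.com/ABDALRAHMAN3421/epreuve.Eau | Eau06.py | capitalize_every_other
-- ===== SOURCE A (Python) =====
-- def capitalize_every_other(string):
--     result = []
--     capitalize = True
--
--     for char in string:
--         if char.isalpha():
--             if capitalize:
--                 result.append(char.upper())
--             else:
--                 result.append(char.lower())
--             capitalize = not capitalize
--         else:
--             result.append(char)
--
--     return ''.join(result)
-- ===== SOURCE B (Python) =====
-- def capitalize_every_other(string):
--     letters = [c for c in string if c.isalpha()]
--     transformed = [c.upper() if i % 2 == 0 else c.lower() for i, c in enumerate(letters)]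
--     it = iter(transformed)
--     return ''.join(next(it) if c.isalpha() else c for c in string)
-- ===== Notes on version B (the rewrite author's own statement) =====
-- stated objective: alternative
-- what changed: Replaces A's single stateful pass with a boolean toggle by three passes: filter out the letters, case them by index parity, then re-stitch them into the non-letter positions via an iterator.
import Mathlib
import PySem

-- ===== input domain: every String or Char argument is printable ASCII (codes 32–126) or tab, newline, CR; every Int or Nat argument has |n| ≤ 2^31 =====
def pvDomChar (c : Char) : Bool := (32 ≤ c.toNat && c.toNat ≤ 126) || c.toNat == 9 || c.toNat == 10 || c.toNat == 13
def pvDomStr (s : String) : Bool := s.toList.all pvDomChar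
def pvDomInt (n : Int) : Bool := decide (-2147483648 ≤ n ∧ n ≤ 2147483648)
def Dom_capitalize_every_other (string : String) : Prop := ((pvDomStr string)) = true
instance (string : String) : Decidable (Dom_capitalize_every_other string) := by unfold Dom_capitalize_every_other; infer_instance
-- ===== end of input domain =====

-- B alternates case by index parity among the letters (three passes) instead of A's
-- one stateful toggle pass; same value, alternative decomposition (no speed claim).

-- ===== PORT A =====
-- A's for-loop: structural recursion over the chars with the same state
-- (the `result` accumulator and the `capitalize` flag).
def capOtherLoop (chars result : List Char) (capitalize : Bool) : List Char :=
  match chars with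
  | [] => result
  | c :: cs =>
    if PySem.Chars.isalpha c then
      if capitalize then
        capOtherLoop cs (result ++ [PySem.Chars.upperChar c]) (!capitalize)
      else
        capOtherLoop cs (result ++ [PySem.Chars.lowerChar c]) (!capitalize)
    else
      capOtherLoop cs (result ++ [c]) capitalize

def capitalize_every_other (string : String) : String :=
  String.mk (capOtherLoop string.toList [] true)

-- ===== PORT B =====
-- [c.upper() if i % 2 == 0 else c.lower() for i, c in enumerate(letters)]
def altTransform (i : Nat) : List Char → List Char
  | [] => []
  | c :: cs =>
    (if i % 2 == 0 then PySem.Chars.upperChar c else PySem.Chars.lowerChar c)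
      :: altTransform (i + 1) cs

-- ''.join(next(it) if c.isalpha() else c for c in string); `next` never hits an
-- exhausted iterator (one transformed letter exists per letter of the string),
-- so the `[]` branch of the match is unreachable.
def altStitch : List Char → List Char → List Char
  | [], _ => []
  | c :: cs, ts =>
    if PySem.Chars.isalpha c then
      match ts with
      | t :: ts' => t :: altStitch cs ts'
      | [] => []
    else
      c :: altStitch cs ts

def capitalize_every_other_alt (string : String) : String :=
  String.mk
    (altStitch string.toList
      (altTransform 0 (string.toList.filter PySem.Chars.isalpha)))

-- ===== PRECONDITION & SPEC =====
def Spec_capitalize_every_other (string : String) (out : String) : Prop := out = capitalize_every_other_alt string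
instance (string : String) (out : String) : Decidable (Spec_capitalize_every_other string out) := by unfold Spec_capitalize_every_other; infer_instance

-- ===== CLAIM (what is proved, stated in full; the proofs are below) =====
def Claim_equal_capitalize_every_other : Prop := ∀ (string : String), Dom_capitalize_every_other string → Spec_capitalize_every_other string (capitalize_every_other string)

-- ===== LEMMAS AND PROOFS =====

-- A's toggle flag equals the parity of the number of letters consumed so far.
lemma capOtherLoop_eq_stitch :
    ∀ (cs res : List Char) (i : Nat),
      capOtherLoop cs res (decide (i % 2 = 0))
        = res ++ altStitch cs (altTransform i (cs.filter PySem.Chars.isalpha)) := by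
  intro cs
  induction cs with
  | nil => intro res i; simp [capOtherLoop, altStitch]
  | cons c cs ih =>
    intro res i
    by_cases h : PySem.Chars.isalpha c = true
    · by_cases hi : i % 2 = 0
      · have h3 : decide ((i + 1) % 2 = 0) = false := by
          simp [Nat.succ_mod_two_eq_one_iff.mpr hi]
        rw [show decide (i % 2 = 0) = true by simp [hi]]
        simp only [capOtherLoop, h, if_true, Bool.not_true]
        rw [show (false : Bool) = decide ((i + 1) % 2 = 0) from h3.symm, ih]
        simp [altTransform, altStitch, h, hi]
      · have hm : i % 2 = 1 := Nat.mod_two_ne_zero.mp hi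
        have h3 : decide ((i + 1) % 2 = 0) = true := by
          simp [Nat.succ_mod_two_eq_zero_iff.mpr hm]
        rw [show decide (i % 2 = 0) = false by simp [hm]]
        simp only [capOtherLoop, h, if_true, Bool.not_false, Bool.false_eq_true,
          if_false]
        rw [show (true : Bool) = decide ((i + 1) % 2 = 0) from h3.symm, ih]
        simp [altTransform, altStitch, h, hm]
    · simp only [capOtherLoop, altStitch, List.filter_cons, h]
      rw [ih]
      simp

-- ===== VERDICT (by name: the statement is the Claim_ definition above) =====
theorem capitalize_every_other_spec : Claim_equal_capitalize_every_other := by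
  intro s _
  unfold Spec_capitalize_every_other capitalize_every_other capitalize_every_other_alt
  have h := capOtherLoop_eq_stitch s.toList [] 0
  simpa using congrArg String.mk h
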